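-- pv_equiv track=rewrite | github.com/guichristmann/adventofcode2019 | 4/4_2.py | meetCriteria
-- ===== SOURCE A (Python) =====
-- def sign(x):
--     if x < 0:
--         return -1
--     elif x > 0:
--         return 1
--     else:
--         return 0
--
-- def meetCriteria(n):
--     str_n = str(n)
--
--     adj_cond = False
--     isMonotonic = True
--     adj_groups = {} # Not elegant but okay
--     for c, c_n in zip(str_n, str_n[1:]):
--         # Check if sequence is monotonic
--         if sign(int(c_n) - int(c)) == -1:
--             isMonotonic = False
--             break
--
--         if c == c_n:
--             if c not in adj_groups.keys():
--                 adj_groups[c] = 1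
--             adj_groups[c] += 1
--             adj_cond = True
--
--     groupWithOnlyTwo = False
--     for v in adj_groups.values():
--         if v == 2:
--             groupWithOnlyTwo = True
--             break
--
--     if adj_cond and isMonotonic and groupWithOnlyTwo:
--         return True
--     else:
--         return False
-- ===== SOURCE B (Python) =====
-- def meetCriteria(n):
--     s = str(n)
--     if any(a > b for a, b in zip(s, s[1:])):
--         return False
--     return _hasDoubleRun(s)
--
-- def _hasDoubleRun(cs):
--     # run-length recursion: strip the leading run, succeed iff its length is exactly 2
--     if not cs:
--         return False
--     k = 1
--     while k < len(cs) and cs[k] == cs[0]: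
--         k += 1
--     return k == 2 or _hasDoubleRun(cs[k:])
-- ===== Notes on version B (the rewrite author's own statement) =====
-- stated objective: simpler
-- what changed: B drops A's incremental adjacency-count dictionary and sign/int machinery: it checks monotonicity by direct character comparison and then tests for a run of length exactly two by a run-length recursion that strips the leading run of the string.
import Mathlib
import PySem

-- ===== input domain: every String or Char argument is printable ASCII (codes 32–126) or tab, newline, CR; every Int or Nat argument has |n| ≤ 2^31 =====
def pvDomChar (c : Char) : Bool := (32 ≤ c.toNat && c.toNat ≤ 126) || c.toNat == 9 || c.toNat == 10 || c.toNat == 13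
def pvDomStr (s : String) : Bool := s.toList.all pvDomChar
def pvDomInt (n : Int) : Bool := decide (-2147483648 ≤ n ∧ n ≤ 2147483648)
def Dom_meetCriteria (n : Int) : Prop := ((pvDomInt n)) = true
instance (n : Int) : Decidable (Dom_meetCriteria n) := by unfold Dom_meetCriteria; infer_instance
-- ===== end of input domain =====

-- B replaces A's incremental adjacency-count dict by a direct run-length recursion
-- (strip the leading run, succeed iff some run has length exactly 2): simpler, no dict.

-- ===== PORT A =====
-- sign(x)
def signA (x : Int) : Int := if x < 0 then -1 else if x > 0 then 1 else 0

-- the for-loop over zip(str_n, str_n[1:]) with its break;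
-- state (adj_cond, isMonotonic, adj_groups); int(c) on a one-char string is
-- (PySem.Int.ofChars? [c]).getD 0 — the default is never reached under Pre_ (digits only)
def loopA : List (Char × Char) → Bool → Bool → PySem.Dict Char Int → Bool × Bool × PySem.Dict Char Int
  | [], adj, mono, g => (adj, mono, g)
  | (c, cn) :: rest, adj, mono, g =>
    if signA ((PySem.Int.ofChars? [cn]).getD 0 - (PySem.Int.ofChars? [c]).getD 0) = -1 then
      (adj, false, g)                      -- isMonotonic = False; break
    else if c = cn then
      let g1 := if !(g.contains c) then g.insert c 1 else g
      loopA rest true mono (g1.insert c (g1.getD c 0 + 1))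
    else
      loopA rest adj mono g

-- the 'for v in adj_groups.values()' loop with its break
def loopTwoA : List Int → Bool
  | [] => false
  | v :: rest => if v = 2 then true else loopTwoA rest

def meetCriteria (n : Int) : Bool :=
  let strn := (PySem.Int.toStr n).toList
  let r := loopA (strn.zip (strn.drop 1)) false true PySem.Dict.empty
  if r.1 && r.2.1 && loopTwoA r.2.2.values then true else false

-- ===== PORT B =====
-- _hasDoubleRun: the while loop counting the leading run of cs[0] gives
-- k = 1 + length of the matching takeWhile on the tail, and cs[k:] is drop k
def hasDoubleRun : List Char → Bool
  | [] => false
  | c :: rest =>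
    ((1 + (rest.takeWhile (fun x => x == c)).length) == 2)
      || hasDoubleRun ((c :: rest).drop (1 + (rest.takeWhile (fun x => x == c)).length))
termination_by cs => cs.length
decreasing_by simp

def meetCriteria_alt (n : Int) : Bool :=
  let s := (PySem.Int.toStr n).toList
  if (s.zip (s.drop 1)).any (fun p => decide (p.1 > p.2)) then false
  else hasDoubleRun s

-- ===== PRECONDITION & SPEC =====
-- Pre_ excludes negative n, on which A raises ValueError (int('-') on the sign character).
def Pre_meetCriteria (n : Int) : Prop := 0 ≤ n
instance (n : Int) : Decidable (Pre_meetCriteria n) := by unfold Pre_meetCriteria; infer_instance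
def pvWitness_meetCriteria : Int := (122)

def Spec_meetCriteria (n : Int) (out : Bool) : Prop := out = meetCriteria_alt n
instance (n : Int) (out : Bool) : Decidable (Spec_meetCriteria n out) := by unfold Spec_meetCriteria; infer_instance

-- ===== CLAIM (what is proved, stated in full; the proofs are below) =====
def Claim_equal_meetCriteria : Prop := ∀ (n : Int), Dom_meetCriteria n → Pre_meetCriteria n → Spec_meetCriteria n (meetCriteria n)

-- ===== LEMMAS AND PROOFS =====

-- a digit character '0'..'9'
def isDig (c : Char) : Prop := 48 ≤ c.toNat ∧ c.toNat ≤ 57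

theorem char_ext_toNat {c d : Char} (h : c.toNat = d.toNat) : c = d := by
  apply Char.ext; apply UInt32.toBitVec_inj.mp; apply BitVec.toNat_inj.mp; exact h

theorem ofChars_digit (c : Char) (h : isDig c) :
    PySem.Int.ofChars? [c] = some ((c.toNat : Int) - 48) := by
  obtain ⟨h1, h2⟩ := h
  have hv : c.toNat = 48 ∨ c.toNat = 49 ∨ c.toNat = 50 ∨ c.toNat = 51 ∨ c.toNat = 52 ∨
      c.toNat = 53 ∨ c.toNat = 54 ∨ c.toNat = 55 ∨ c.toNat = 56 ∨ c.toNat = 57 := by omega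
  have hrepl : c = Char.ofNat c.toNat := (Char.ofNat_toNat c).symm
  rcases hv with h | h | h | h | h | h | h | h | h | h <;>
    · rw [h] at hrepl; rw [h, hrepl]; decide

theorem digitChar_isDig (m : Nat) (h : m < 10) : isDig (Nat.digitChar m) := by
  interval_cases m <;> exact ⟨by decide, by decide⟩

theorem toDigitsCore_digits : ∀ (fuel m : Nat) (ds : List Char), (∀ c ∈ ds, isDig c) →
    ∀ c ∈ Nat.toDigitsCore 10 fuel m ds, isDig c := by
  intro fuel
  induction fuel with
  | zero => intro m ds hds; simpa [Nat.toDigitsCore] using hds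
  | succ fuel ih =>
    intro m ds hds c hc
    rw [Nat.toDigitsCore] at hc
    by_cases h0 : m / 10 = 0
    · rw [if_pos h0] at hc
      rcases List.mem_cons.mp hc with h | h
      · subst h; exact digitChar_isDig _ (Nat.mod_lt _ (by omega))
      · exact hds _ h
    · rw [if_neg h0] at hc
      refine ih (m / 10) _ ?_ c hc
      intro x hx
      rcases List.mem_cons.mp hx with h | h
      · subst h; exact digitChar_isDig _ (Nat.mod_lt _ (by omega))
      · exact hds _ h

theorem toStr_digits (n : Int) (h : 0 ≤ n) : ∀ c ∈ (PySem.Int.toStr n).toList, isDig c := by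
  rw [PySem.Int.toList_toStr]
  unfold PySem.Int.toChars
  rw [if_neg (by omega)]
  exact toDigitsCore_digits _ _ _ (by simp)

-- A's monotonicity test on a pair of digit characters is the character comparison
theorem signA_digits (c cn : Char) (hc : isDig c) (hcn : isDig cn) :
    (signA ((PySem.Int.ofChars? [cn]).getD 0 - (PySem.Int.ofChars? [c]).getD 0) = -1)
      ↔ cn.toNat < c.toNat := by
  rw [ofChars_digit c hc, ofChars_digit cn hcn]
  simp only [Option.getD_some, signA]
  constructor
  · intro h; by_contra hlt; split_ifs at h <;> omega
  · intro h; rw [if_pos (by omega)]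

theorem values_insert_fresh (g : PySem.Dict Char Int) (c : Char) (v : Int)
    (h : g.contains c = false) : (g.insert c v).values = g.values ++ [v] := by
  simp only [PySem.Dict.values, PySem.Dict.items_insert_of_not_contains g v h, List.map_append]
  rfl

-- processing j equal pairs (c,c) when c is already in the dict with value m
theorem loopA_run (c : Char) (hc : isDig c) :
    ∀ (j : Nat) (ps : List (Char × Char)) (adj : Bool) (g : PySem.Dict Char Int) (m : Int),
    loopA (List.replicate j (c, c) ++ ps) adj true (g.insert c m) =
      loopA ps (if j = 0 then adj else true) true (g.insert c (m + j)) := by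
  intro j
  induction j with
  | zero => intro ps adj g m; simp
  | succ j ih =>
    intro ps adj g m
    rw [List.replicate_succ, List.cons_append, loopA]
    rw [if_neg (by rw [signA_digits c c hc hc]; omega), if_pos rfl]
    have hcont : ((g.insert c m).contains c) = true := PySem.Dict.contains_insert_self g c m
    rw [if_neg (by simp [hcont] : ¬ ((!(g.insert c m).contains c) = true))]
    simp only [PySem.Dict.getD_insert_self, PySem.Dict.insert_insert_self]
    rw [ih ps true g (m + 1)]
    have hm : m + 1 + (j : Int) = m + ((j : Nat) + 1 : Nat) := by push_cast; ring
    rw [hm]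
    congr 1
    simp

-- processing j equal pairs (c,c) when c is fresh
theorem loopA_run_fresh (c : Char) (hc : isDig c) (j : Nat) (ps : List (Char × Char))
    (adj : Bool) (g : PySem.Dict Char Int) (hfresh : g.contains c = false) :
    loopA (List.replicate j (c, c) ++ ps) adj true g =
      if j = 0 then loopA ps adj true g else loopA ps true true (g.insert c ((j : Int) + 1)) := by
  cases j with
  | zero => simp
  | succ j =>
    rw [if_neg (by omega)]
    rw [List.replicate_succ, List.cons_append, loopA]
    rw [if_neg (by rw [signA_digits c c hc hc]; omega), if_pos rfl]
    rw [if_pos (by simp [hfresh] : ((!g.contains c) = true))]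
    simp only [PySem.Dict.getD_insert_self, PySem.Dict.insert_insert_self]
    rw [show (1 : Int) + 1 = 2 from rfl]
    rw [loopA_run c hc j ps true g 2]
    have hm : (2 : Int) + (j : Nat) = (((j : Nat) + 1 : Nat) : Int) + 1 := by push_cast; ring
    rw [hm]
    congr 1
    simp

-- zip(s, s[1:]) of a leading run
def zp (cs : List Char) : List (Char × Char) := cs.zip (cs.drop 1)

theorem zp_run : ∀ (k : Nat) (c : Char) (d : List Char),
    zp (List.replicate (k + 1) c ++ d) =
      List.replicate k (c, c) ++ (match d with | [] => [] | d0 :: _ => (c, d0) :: zp d) := by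
  intro k
  induction k with
  | zero =>
    intro c d
    cases d with
    | nil => rfl
    | cons d0 dt => rfl
  | succ k ih =>
    intro c d
    have h1 : List.replicate (k + 1) c ++ d = c :: (List.replicate k c ++ d) := by
      rw [List.replicate_succ, List.cons_append]
    rw [List.replicate_succ, List.cons_append, h1]
    show (c, c) :: zp (c :: (List.replicate k c ++ d)) = _
    rw [← h1, ih c d, List.replicate_succ, List.cons_append]

-- run lengths ≥ 2 of the list, as the dict values A accumulates
def bigRuns : List Char → List Int
  | [] => []
  | c :: rest =>
    (if (rest.takeWhile (fun x => x == c)).length = 0 then []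
     else [((rest.takeWhile (fun x => x == c)).length : Int) + 1])
      ++ bigRuns (rest.dropWhile (fun x => x == c))
termination_by cs => cs.length
decreasing_by
  have := List.length_dropWhile_le (fun x => x == c) rest
  simp
  omega

theorem takeWhile_rep (c : Char) (rest : List Char) :
    rest.takeWhile (fun x => x == c) = List.replicate (rest.takeWhile (fun x => x == c)).length c := by
  rw [List.eq_replicate_length]
  intro b hb
  have := List.mem_takeWhile_imp hb
  simpa using this

-- the main loop on a sorted digit list, from a dict not containing any of its characters
theorem loopA_main : ∀ (N : Nat) (cs : List Char), cs.length ≤ N →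
    (∀ x ∈ cs, isDig x) → List.Pairwise (· ≤ ·) cs →
    ∀ (adj : Bool) (g : PySem.Dict Char Int),
      (∀ x ∈ cs, g.contains x = false) → g.keys.Nodup →
      (loopA (zp cs) adj true g).1 = (adj || !(bigRuns cs).isEmpty) ∧
      (loopA (zp cs) adj true g).2.1 = true ∧
      (loopA (zp cs) adj true g).2.2.values = g.values ++ bigRuns cs := by
  intro N
  induction N with
  | zero =>
    intro cs hlen _ _ adj g _ _
    have : cs = [] := List.eq_nil_of_length_eq_zero (by omega)
    subst this
    simp [zp, loopA, bigRuns]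
  | succ N ih =>
    intro cs hlen hdig hpw adj g hfresh hnd
    cases cs with
    | nil => simp [zp, loopA, bigRuns]
    | cons c rest =>
      have hcdig : isDig c := hdig c (by simp)
      obtain ⟨t, d, ht, hd⟩ : ∃ t d, t = rest.takeWhile (fun x => x == c) ∧
          d = rest.dropWhile (fun x => x == c) := ⟨_, _, rfl, rfl⟩
      have hrest : rest = t ++ d := by rw [ht, hd]; exact (List.takeWhile_append_dropWhile).symm
      have htrep : t = List.replicate t.length c := by
        conv_lhs => rw [ht]
        rw [← ht]; exact ht ▸ takeWhile_rep c rest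
      have hcs : c :: rest = List.replicate (t.length + 1) c ++ d := by
        rw [List.replicate_succ, List.cons_append, ← htrep, ← hrest]
      have hbig : bigRuns (c :: rest) =
          (if t.length = 0 then [] else [((t.length : Nat) : Int) + 1]) ++ bigRuns d := by
        rw [bigRuns, ← ht, ← hd]
      have hdsub : ∀ x ∈ d, x ∈ rest := by
        intro x hx
        rw [hrest]; exact List.mem_append_right _ hx
      have hdlen : d.length ≤ N := by
        have h2 : rest.length ≤ N := by simpa using Nat.le_of_succ_le_succ (by simpa using hlen)
        have h3 : rest.length = t.length + d.length := by rw [hrest]; simp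
        omega
      have hdig' : ∀ x ∈ d, isDig x := fun x hx => hdig x (List.mem_cons_of_mem _ (hdsub x hx))
      have hpw' : List.Pairwise (· ≤ ·) d := by
        refine List.Pairwise.sublist ?_ (List.pairwise_cons.mp hpw).2
        rw [hrest]; exact List.sublist_append_right t d
      have hhead : ∀ x ∈ rest, c ≤ x := (List.pairwise_cons.mp hpw).1
      rw [hbig]
      rcases d with _ | ⟨d0, dt⟩
      · have hzp : zp (c :: rest) = List.replicate t.length (c, c) ++ ([] : List (Char × Char)) := by
          rw [hcs]; exact zp_run t.length c []
        rw [hzp]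
        rw [loopA_run_fresh c hcdig t.length [] adj g (hfresh c (by simp))]
        by_cases hk : t.length = 0
        · rw [if_pos hk, if_pos hk]
          simp [loopA, bigRuns]
        · rw [if_neg hk, if_neg hk]
          refine ⟨by simp [loopA], by simp [loopA], ?_⟩
          simp only [loopA]
          rw [values_insert_fresh g c _ (hfresh c (by simp))]
          simp [bigRuns]
      · have hzp : zp (c :: rest) = List.replicate t.length (c, c) ++ ((c, d0) :: zp (d0 :: dt)) := by
          rw [hcs]; exact zp_run t.length c (d0 :: dt)
        have hp0 : (d0 == c) = false := by
          have := List.head?_dropWhile_not (fun x => x == c) rest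
          rw [← hd] at this
          simpa using this
        have hne : d0 ≠ c := by simpa using hp0
        have hlt : c.toNat < d0.toNat := by
          have hle : c ≤ d0 := hhead d0 (hdsub d0 (by simp))
          have hle' : c.toNat ≤ d0.toNat := hle
          rcases Nat.lt_or_ge c.toNat d0.toNat with h | h
          · exact h
          · exact absurd (char_ext_toNat (by omega)).symm hne
        have hd0dig : isDig d0 := hdig' d0 (by simp)
        have hstep : ∀ (adj' : Bool) (g' : PySem.Dict Char Int),
            loopA ((c, d0) :: zp (d0 :: dt)) adj' true g' = loopA (zp (d0 :: dt)) adj' true g' := by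
          intro adj' g'
          rw [loopA]
          rw [if_neg (by rw [signA_digits c d0 hcdig hd0dig]; omega)]
          rw [if_neg (fun h => hne h.symm)]
        rw [hzp]
        rw [loopA_run_fresh c hcdig t.length ((c, d0) :: zp (d0 :: dt)) adj g (hfresh c (by simp))]
        by_cases hk : t.length = 0
        · rw [if_pos hk, if_pos hk]
          rw [hstep]
          obtain ⟨i1, i2, i3⟩ := ih (d0 :: dt) hdlen hdig' hpw' adj g
            (fun x hx => hfresh x (List.mem_cons_of_mem _ (hdsub x hx))) hnd
          exact ⟨by rw [i1]; simp, i2, by rw [i3]; simp⟩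
        · rw [if_neg hk, if_neg hk]
          rw [hstep]
          have hfresh2 : ∀ x ∈ (d0 :: dt), (g.insert c ((t.length : Int) + 1)).contains x = false := by
            intro x hx
            rw [PySem.Dict.contains_insert]
            have hgx : g.contains x = false := hfresh x (List.mem_cons_of_mem _ (hdsub x hx))
            have hxc : x ≠ c := by
              rcases List.mem_cons.mp hx with h | h
              · subst h; exact hne
              · have h1 : d0 ≤ x := (List.pairwise_cons.mp hpw').1 x h
                have h2 : d0.toNat ≤ x.toNat := h1
                intro he; subst he; omega
            simp [hgx, hxc]
          obtain ⟨i1, i2, i3⟩ := ih (d0 :: dt) hdlen hdig' hpw' true (g.insert c ((t.length : Int) + 1))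
            hfresh2 (PySem.Dict.nodup_keys_insert g c _ hnd)
          refine ⟨by rw [i1]; simp, i2, ?_⟩
          rw [i3, values_insert_fresh g c _ (hfresh c (by simp))]
          simp [List.append_assoc]

theorem loopA_monoAll : ∀ (ps : List (Char × Char)) (adj : Bool) (g : PySem.Dict Char Int),
    (∀ p ∈ ps, isDig p.1 ∧ isDig p.2) →
    (loopA ps adj true g).2.1 = ps.all (fun p => !decide (p.2.toNat < p.1.toNat)) := by
  intro ps
  induction ps with
  | nil => intro adj g _; rfl
  | cons p rest ih =>
    intro adj g hdig
    obtain ⟨c, cn⟩ := p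
    obtain ⟨hc, hcn⟩ := hdig (c, cn) (by simp)
    by_cases hlt : cn.toNat < c.toNat
    · rw [loopA, if_pos ((signA_digits c cn hc hcn).mpr hlt)]
      simp [hlt]
    · rw [loopA, if_neg (fun h => hlt ((signA_digits c cn hc hcn).mp h))]
      have hrest : ∀ p ∈ rest, isDig p.1 ∧ isDig p.2 := fun p hp => hdig p (by simp [hp])
      by_cases heq : c = cn
      · rw [if_pos heq]
        simp only [List.all_cons]
        rw [ih _ _ hrest]
        simp [hlt]
      · rw [if_neg heq]
        simp only [List.all_cons]
        rw [ih _ _ hrest]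
        simp [hlt]

theorem loopTwoA_eq_any : ∀ vs : List Int, loopTwoA vs = vs.any (fun v => v == 2) := by
  intro vs
  induction vs with
  | nil => rfl
  | cons v rest ih => by_cases h : v = 2 <;> simp [loopTwoA, h, ih]

theorem chain_of_all : ∀ cs : List Char,
    (cs.zip (cs.drop 1)).all (fun p => !decide (p.2.toNat < p.1.toNat)) = true →
    List.IsChain (· ≤ ·) cs := by
  intro cs
  induction cs with
  | nil => intro _; simp
  | cons c rest ih =>
    intro h
    cases rest with
    | nil => simp
    | cons c2 t =>
      have hsplit : ((c :: c2 :: t).zip ((c :: c2 :: t).drop 1)) =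
          (c, c2) :: ((c2 :: t).zip ((c2 :: t).drop 1)) := rfl
      rw [hsplit, List.all_cons, Bool.and_eq_true] at h
      rw [List.isChain_cons_cons]
      constructor
      · show c.toNat ≤ c2.toNat
        have := h.1
        simp at this
        omega
      · exact ih h.2

theorem hasDoubleRun_eq : ∀ (N : Nat) (cs : List Char), cs.length ≤ N →
    hasDoubleRun cs = (bigRuns cs).any (fun v => v == 2) := by
  intro N
  induction N with
  | zero =>
    intro cs hlen
    have : cs = [] := List.eq_nil_of_length_eq_zero (by omega)
    subst this
    simp [hasDoubleRun, bigRuns]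
  | succ N ih =>
    intro cs hlen
    cases cs with
    | nil => simp [hasDoubleRun, bigRuns]
    | cons c rest =>
      obtain ⟨t, d, ht, hd⟩ : ∃ t d, t = rest.takeWhile (fun x => x == c) ∧
          d = rest.dropWhile (fun x => x == c) := ⟨_, _, rfl, rfl⟩
      have hrest : rest = t ++ d := by rw [ht, hd]; exact (List.takeWhile_append_dropWhile).symm
      have hdrop : (c :: rest).drop (1 + t.length) = d := by
        rw [show 1 + t.length = t.length + 1 from by omega, List.drop_succ_cons, hrest]
        exact List.drop_left
      have hdlen : d.length ≤ N := by
        have h2 : rest.length ≤ N := by simpa using Nat.le_of_succ_le_succ (by simpa using hlen)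
        have h3 : rest.length = t.length + d.length := by rw [hrest]; simp
        omega
      rw [hasDoubleRun, ← ht, hdrop, ih d hdlen, bigRuns, ← ht, ← hd]
      by_cases hk : t.length = 0
      · simp [hk]
      · rw [if_neg hk, List.cons_append, List.nil_append, List.any_cons]
        have hhead : ((1 + t.length == 2)) = (((t.length : Nat) : Int) + 1 == 2) := by
          by_cases h1 : t.length = 1
          · simp [h1]
          · have e1 : (1 + t.length == 2) = false := by simp; omega
            have e2 : ((((t.length : Nat) : Int) + 1) == 2) = false := by simp; omega
            rw [e1, e2]
        rw [hhead]

-- ===== VERDICT (by name: the statement is the Claim_ definition above) =====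
theorem meetCriteria_spec : Claim_equal_meetCriteria := by
  unfold Claim_equal_meetCriteria
  intro n _ hpre
  unfold Spec_meetCriteria meetCriteria meetCriteria_alt
  simp only
  have hdig := toStr_digits n hpre
  set cs := (PySem.Int.toStr n).toList with hcs
  by_cases hany : (cs.zip (cs.drop 1)).any (fun p => decide (p.1 > p.2)) = true
  · rw [if_pos hany]
    have hdigp : ∀ p ∈ cs.zip (cs.drop 1), isDig p.1 ∧ isDig p.2 := by
      intro p hp
      obtain ⟨a, b⟩ := p
      obtain ⟨h1, h2⟩ := List.of_mem_zip hp
      exact ⟨hdig _ h1, hdig _ (List.mem_of_mem_drop h2)⟩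
    have hm := loopA_monoAll (cs.zip (cs.drop 1)) false PySem.Dict.empty hdigp
    have hall : (cs.zip (cs.drop 1)).all (fun p => !decide (p.2.toNat < p.1.toNat)) = false := by
      rcases List.any_eq_true.mp hany with ⟨p, hp, hpd⟩
      refine List.all_eq_false.mpr ⟨p, hp, ?_⟩
      have : p.2.toNat < p.1.toNat := of_decide_eq_true hpd
      simp [this]
    rw [hall] at hm
    rw [Bool.and_comm _ ((loopA (cs.zip (cs.drop 1)) false true PySem.Dict.empty).2.1)] at *
    rw [hm]
    simp
  · rw [if_neg hany]
    have hall : (cs.zip (cs.drop 1)).all (fun p => !decide (p.2.toNat < p.1.toNat)) = true := by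
      rw [List.all_eq_true]
      intro p hp
      have hnd : ¬ (decide (p.1 > p.2) = true) := fun h => hany (List.any_eq_true.mpr ⟨p, hp, h⟩)
      have : ¬ (p.2.toNat < p.1.toNat) := fun h => hnd (decide_eq_true h)
      simpa using this
    have hpw := List.isChain_iff_pairwise.mp (chain_of_all cs hall)
    obtain ⟨h1, h2, h3⟩ := loopA_main cs.length cs le_rfl hdig hpw false PySem.Dict.empty
      (fun x _ => PySem.Dict.contains_empty x) PySem.Dict.nodup_keys_empty
    have hzz : zp cs = cs.zip (cs.drop 1) := rfl
    rw [hzz] at h1 h2 h3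
    rw [h1, h2, h3, loopTwoA_eq_any, hasDoubleRun_eq cs.length cs le_rfl]
    have hev : (PySem.Dict.empty : PySem.Dict Char Int).values = [] := rfl
    rw [hev, List.nil_append]
    cases hbr : bigRuns cs with
    | nil => simp
    | cons v vs =>
      cases h : ((v :: vs).any (fun v => v == 2)) <;> simp [h]
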